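-- pv_equiv track=rewrite | github.com/vipinvkmenon/canddatastructures_python | chapter23/example7.py | hGetIndex
-- ===== SOURCE A (Python) =====
-- HASHSIZE = 23             # some prime val.
--
-- SHIFTBY = 3
--
-- def hGetIndex(key):
--     # returns index into hashtable applying hash function.
--     # uses shift-folding followed by mod function for hashing.
--     finaln = 0
--     keyptr = key
--     t = 0
--     while(t < len(keyptr)):
--         i = 0
--         n = 0
--         j = 0
--         while(i < SHIFTBY and j < len(keyptr)):
--             n = n * 10 + ord(keyptr[j])
--             i = i + 1
--             j = j + 1
--         finaln += n
--         t += 1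
--     finaln %= HASHSIZE
--     return finaln
-- ===== SOURCE B (Python) =====
-- def hGetIndex(key):
--     # Each outer iteration of A adds the same fold of the first SHIFTBY(=3)
--     # chars; compute it once, multiply by len(key), mod HASHSIZE(=23).
--     n = 0
--     for ch in key[:3]:
--         n = n * 10 + ord(ch)
--     return (n * len(key)) % 23
-- ===== Notes on version B (the rewrite author's own statement) =====
-- stated objective: faster
-- what changed: A recomputes the same fold of the first 3 chars once per character of the key; B computes that fold once and multiplies by len(key) before taking mod 23.
import Mathlib
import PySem

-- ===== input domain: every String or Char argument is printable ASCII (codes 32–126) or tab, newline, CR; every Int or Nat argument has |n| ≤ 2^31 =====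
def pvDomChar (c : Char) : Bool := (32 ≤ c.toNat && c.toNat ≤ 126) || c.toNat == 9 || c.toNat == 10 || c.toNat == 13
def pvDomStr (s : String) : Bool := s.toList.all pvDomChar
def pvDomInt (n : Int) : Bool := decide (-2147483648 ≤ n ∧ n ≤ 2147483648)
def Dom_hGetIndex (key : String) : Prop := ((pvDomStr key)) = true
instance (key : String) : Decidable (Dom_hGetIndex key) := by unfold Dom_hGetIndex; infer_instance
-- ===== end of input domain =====

-- B computes A's per-iteration fold of the first 3 chars once and multiplies by the length (faster in a timing run).


-- ===== PORT A =====
-- inner while: while(i < SHIFTBY and j < len): n = n*10 + ord(key[j]); i+=1; j+=1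
-- (j indexes the list from its head, so we recurse on the remaining chars)
def pyInnerA (i : Nat) (rest : List Char) (n : Int) : Int :=
  if i < 3 then
    match rest with
    | [] => n
    | c :: cs => pyInnerA (i + 1) cs (n * 10 + (c.toNat : Int))
  else n

-- outer while: while(t < len): finaln += <inner fold of key>; t += 1
def pyOuterA (t len : Nat) (key : List Char) (finaln : Int) : Int :=
  if t < len then pyOuterA (t + 1) len key (finaln + pyInnerA 0 key 0) else finaln
termination_by len - t

def hGetIndex (key : String) : Int :=
  PySem.Int.mod (pyOuterA 0 key.toList.length key.toList 0) 23

-- ===== PORT B =====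
def hGetIndex_alt (key : String) : Int :=
  let n := (key.toList.take 3).foldl (fun n c => n * 10 + (c.toNat : Int)) 0
  PySem.Int.mod (n * (key.toList.length : Int)) 23

-- ===== PRECONDITION & SPEC =====
def Spec_hGetIndex (key : String) (out : Int) : Prop := out = hGetIndex_alt key
instance (key : String) (out : Int) : Decidable (Spec_hGetIndex key out) := by unfold Spec_hGetIndex; infer_instance

-- ===== CLAIM (what is proved, stated in full; the proofs are below) =====
def Claim_equal_hGetIndex : Prop := ∀ (key : String), Dom_hGetIndex key → Spec_hGetIndex key (hGetIndex key)

-- ===== LEMMAS AND PROOFS =====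

theorem pyInnerA_eq_foldl (rest : List Char) : ∀ (i : Nat) (n : Int),
    pyInnerA i rest n = (rest.take (3 - i)).foldl (fun n c => n * 10 + (c.toNat : Int)) n := by
  induction rest with
  | nil => intro i n; unfold pyInnerA; split <;> simp
  | cons c cs ih =>
    intro i n
    unfold pyInnerA
    by_cases h : i < 3
    · have : 3 - i = (3 - (i + 1)) + 1 := by omega
      simp [h, this, ih]
    · have : 3 - i = 0 := by omega
      simp [h, this]

theorem pyOuterA_eq (len : Nat) (key : List Char) : ∀ (k t : Nat) (finaln : Int),
    len - t = k → pyOuterA t len key finaln = finaln + (k : Int) * pyInnerA 0 key 0 := by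
  intro k
  induction k with
  | zero =>
    intro t f h
    unfold pyOuterA
    have : ¬ t < len := by omega
    simp [this]
  | succ m ih =>
    intro t f h
    unfold pyOuterA
    have ht : t < len := by omega
    rw [if_pos ht, ih (t + 1) _ (by omega)]
    push_cast
    ring

theorem hGetIndex_spec : Claim_equal_hGetIndex := by
  intro key _
  unfold Spec_hGetIndex hGetIndex hGetIndex_alt
  rw [pyOuterA_eq key.toList.length key.toList key.toList.length 0 0 (by omega),
      pyInnerA_eq_foldl]
  simp [mul_comm]
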